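-- pv_equiv track=rewrite | github.com/dahrb/Inventive_Step_ADM | ADM/old/batched_hybrid_system_backup.py | extract_latest_case_outcome_block
-- ===== SOURCE A (Python) =====
-- def extract_latest_case_outcome_block(raw_text: str) -> str:
--     """Extract the latest ADM case outcome block from UI output.
--
--     Tries to capture from "Case Outcome:" through summary/reasoning lines until
--     the summary append line or the next major UI section starts.
--     """
--     if not raw_text:
--         return ""
--
--     marker = "Case Outcome:"
--     last_idx = raw_text.rfind(marker)
--     if last_idx == -1:
--         return ""
--
--     tail = raw_text[last_idx:]
--
--     end_markers = [
--         "ADM and sub-ADM summaries appended to:",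
--         "\nINFO: ADM created",
--         "\n[Q]",
--         "\n[Q1]",
--         "\n[Q100]",
--         "\n[UI.py] [Q]",
--         "\n[UI.py] [Q1]",
--         "\n[UI.py] [Q100]",
--     ]
--
--     end_positions = [pos for marker_text in end_markers if (pos := tail.find(marker_text)) != -1]
--     end_idx = min(end_positions) if end_positions else len(tail)
--
--     block = tail[:end_idx].strip()
--     return block
-- ===== SOURCE B (Python) =====
-- def extract_latest_case_outcome_block(raw_text: str) -> str:
--     """Extract the latest ADM case outcome block from UI output.
--
--     Same guards as the original, but the end of the block is found by a
--     single left-to-right scan for the leftmost start of any end marker.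
--     """
--     if not raw_text:
--         return ""
--
--     marker = "Case Outcome:"
--     last_idx = raw_text.rfind(marker)
--     if last_idx == -1:
--         return ""
--
--     tail = raw_text[last_idx:]
--
--     end_markers = [
--         "ADM and sub-ADM summaries appended to:",
--         "\nINFO: ADM created",
--         "\n[Q]",
--         "\n[Q1]",
--         "\n[Q100]",
--         "\n[UI.py] [Q]",
--         "\n[UI.py] [Q1]",
--         "\n[UI.py] [Q100]",
--     ]
--
--     end_idx = len(tail)
--     for i in range(len(tail)):
--         if any(tail.startswith(m, i) for m in end_markers):
--             end_idx = i
--             break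
--
--     return tail[:end_idx].strip()
-- ===== Notes on version B (the rewrite author's own statement) =====
-- stated objective: alternative
-- what changed: Replaces the per-marker find()-then-min computation of the block end by a single left-to-right scan of the tail that stops at the first position where any end marker starts.
import Mathlib
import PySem

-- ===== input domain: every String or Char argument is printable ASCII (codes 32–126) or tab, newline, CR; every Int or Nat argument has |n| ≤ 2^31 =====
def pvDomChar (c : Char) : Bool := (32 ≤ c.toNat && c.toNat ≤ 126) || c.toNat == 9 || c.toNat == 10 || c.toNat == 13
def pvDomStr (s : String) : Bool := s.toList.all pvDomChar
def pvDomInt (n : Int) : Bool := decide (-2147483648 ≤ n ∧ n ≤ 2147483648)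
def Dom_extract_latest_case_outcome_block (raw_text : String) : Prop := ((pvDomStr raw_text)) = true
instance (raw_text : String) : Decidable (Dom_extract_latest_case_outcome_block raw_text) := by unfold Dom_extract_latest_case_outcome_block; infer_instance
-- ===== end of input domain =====

-- B replaces A's "compute each end marker's find() position, then take the min" by a single
-- left-to-right scan of the tail stopping at the first position where any end marker starts
-- (objective: alternative; same cost; return values proved identical).

-- ===== PORT A =====
def extract_latest_case_outcome_block (raw_text : String) : String :=
  if raw_text = "" then ""
  else
    let marker := "Case Outcome:"
    let last_idx := PySem.Str.rfind raw_text marker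
    if last_idx = -1 then ""
    else
      let tail := PySem.Str.slice raw_text (some last_idx) none
      let end_markers : List String :=
        ["ADM and sub-ADM summaries appended to:",
         "\nINFO: ADM created",
         "\n[Q]",
         "\n[Q1]",
         "\n[Q100]",
         "\n[UI.py] [Q]",
         "\n[UI.py] [Q1]",
         "\n[UI.py] [Q100]"]
      let end_positions : List Int :=
        (end_markers.map (fun marker_text => PySem.Str.find tail marker_text)).filter
          (fun pos => pos ≠ -1)
      let end_idx : Int :=
        match PySem.List.min? end_positions (fun x => x) with
        | some m => m
        | none => (PySem.Str.len tail : Int)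
      PySem.Str.strip (PySem.Str.slice tail none (some end_idx))

-- ===== PORT B =====
-- B's scan: index of the first position where some marker is a prefix of the rest
-- (= B's 'for i in range(len(tail)): if any(tail.startswith(m, i)): break', length if none).
def pvFirstHit (markers : List (List Char)) : List Char → Nat
  | [] => 0
  | c :: rest =>
      if markers.any (fun m => m.isPrefixOf (c :: rest)) then 0
      else pvFirstHit markers rest + 1

def extract_latest_case_outcome_block_alt (raw_text : String) : String :=
  if raw_text = "" then ""
  else
    let marker := "Case Outcome:"
    let last_idx := PySem.Str.rfind raw_text marker
    if last_idx = -1 then ""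
    else
      let tail := PySem.Str.slice raw_text (some last_idx) none
      let end_markers : List String :=
        ["ADM and sub-ADM summaries appended to:",
         "\nINFO: ADM created",
         "\n[Q]",
         "\n[Q1]",
         "\n[Q100]",
         "\n[UI.py] [Q]",
         "\n[UI.py] [Q1]",
         "\n[UI.py] [Q100]"]
      let end_idx : Nat := pvFirstHit (end_markers.map String.toList) tail.toList
      PySem.Str.strip (PySem.Str.slice tail none (some (end_idx : Int)))

-- ===== PRECONDITION & SPEC =====
def Spec_extract_latest_case_outcome_block (raw_text : String) (out : String) : Prop := out = extract_latest_case_outcome_block_alt raw_text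
instance (raw_text : String) (out : String) : Decidable (Spec_extract_latest_case_outcome_block raw_text out) := by unfold Spec_extract_latest_case_outcome_block; infer_instance

-- ===== CLAIM (what is proved, stated in full; the proofs are below) =====
def Claim_equal_extract_latest_case_outcome_block : Prop := ∀ (raw_text : String), Dom_extract_latest_case_outcome_block raw_text → Spec_extract_latest_case_outcome_block raw_text (extract_latest_case_outcome_block raw_text)

-- ===== LEMMAS AND PROOFS =====

theorem pvFirstHit_spec (M : List (List Char)) (cs : List Char) :
    pvFirstHit M cs ≤ cs.length ∧
    (∀ i < pvFirstHit M cs, ¬ ∃ m ∈ M, m <+: cs.drop i) ∧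
    (pvFirstHit M cs = cs.length ∨ ∃ m ∈ M, m <+: cs.drop (pvFirstHit M cs)) := by
  induction cs with
  | nil => simp [pvFirstHit]
  | cons c rest ih =>
    by_cases h : M.any (fun m => m.isPrefixOf (c :: rest)) = true
    · refine ⟨by simp [pvFirstHit, h], by simp [pvFirstHit, h], Or.inr ?_⟩
      simp [pvFirstHit, h]
      rcases List.any_eq_true.mp h with ⟨m, hm, hp⟩
      exact ⟨m, hm, List.isPrefixOf_iff_prefix.mp hp⟩
    · obtain ⟨ih1, ih2, ih3⟩ := ih
      refine ⟨by simp [pvFirstHit, h]; omega, ?_, ?_⟩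
      · intro i hi
        simp [pvFirstHit, h] at hi
        match i with
        | 0 =>
          intro ⟨m, hm, hp⟩
          exact h (List.any_eq_true.mpr ⟨m, hm, List.isPrefixOf_iff_prefix.mpr hp⟩)
        | j + 1 =>
          simpa using ih2 j (by omega)
      · rcases ih3 with h3 | h3
        · exact Or.inl (by simp [pvFirstHit, h, h3])
        · exact Or.inr (by simpa [pvFirstHit, h] using h3)

-- A's end index (per-marker find, then min) equals B's scan index, on char lists.
theorem pvKeyC (M : List (List Char)) (hM : ∀ m ∈ M, m ≠ []) (cs : List Char) :
    (match PySem.List.min? ((M.map (fun m => PySem.Chars.find cs m)).filter (fun p => p ≠ -1)) (fun x => x) with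
     | some v => v
     | none => (cs.length : Int)) = (pvFirstHit M cs : Int) := by
  obtain ⟨hle, hnone, hlast⟩ := pvFirstHit_spec M cs
  set k := pvFirstHit M cs with hk
  cases hps : (M.map (fun m => PySem.Chars.find cs m)).filter (fun p => p ≠ -1) with
  | nil =>
    -- no marker occurs: every find is -1, so no marker is a prefix of any drop, so k = cs.length
    have hnofind : ∀ m ∈ M, PySem.Chars.find cs m = -1 := by
      intro m hm
      by_contra hne
      have : PySem.Chars.find cs m ∈
          (M.map (fun m => PySem.Chars.find cs m)).filter (fun p => p ≠ -1) :=
        List.mem_filter.mpr ⟨List.mem_map.mpr ⟨m, hm, rfl⟩, by simpa using hne⟩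
      rw [hps] at this
      simp at this
    have hklen : k = cs.length := by
      rcases hlast with h | ⟨m, hm, hp⟩
      · exact h
      · exfalso
        exact ((PySem.Chars.find_eq_neg_one_iff cs m).mp (hnofind m hm))
          (hp.isInfix.trans (cs.drop_suffix k).isInfix)
    simp [hklen, PySem.List.min?]
  | cons p rest =>
    -- some marker occurs; min of finds = k
    have hmin := PySem.List.min?_id_cons p rest
    set v := List.foldl min p rest with hv
    have hvmem : v ∈ (M.map (fun m => PySem.Chars.find cs m)).filter (fun p => p ≠ -1) := by
      rw [hps]
      rcases PySem.List.foldl_min_mem rest p with h | h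
      · exact (h ▸ List.mem_cons_self)
      · exact List.mem_cons_of_mem _ h
    obtain ⟨⟨m, hmM, hmv⟩, hvne⟩ := by
      simpa only [List.mem_filter, List.mem_map, decide_eq_true_eq] using hvmem
    have hvnn : 0 ≤ v := by
      have := PySem.Chars.neg_one_le_find cs m
      omega
    have hfind := PySem.Chars.find_spec (s := cs) (sub := m) (by omega : 0 ≤ PySem.Chars.find cs m)
    rw [hmv] at hfind
    -- k ≤ v.toNat : a marker starts at v.toNat, and no marker starts before k
    have hkv : k ≤ v.toNat := by
      by_contra hlt
      exact hnone v.toNat (by omega) ⟨m, hmM, hfind.1⟩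
    -- some marker starts at k
    have hex : ∃ m' ∈ M, m' <+: cs.drop k := by
      rcases hlast with hkl | hex
      · exfalso
        have hvle : v ≤ (cs.length : Int) := hmv ▸ PySem.Chars.find_le_length cs m
        have hvk : v.toNat = k := by omega
        have : m <+: ([] : List Char) := by
          have := hfind.1
          rwa [hvk, hkl, List.drop_length] at this
        exact hM m hmM (List.prefix_nil.mp this)
      · exact hex
    obtain ⟨m', hm', hp'⟩ := hex
    have hnn' : 0 ≤ PySem.Chars.find cs m' :=
      (PySem.Chars.find_nonneg_iff cs m').mpr (hp'.isInfix.trans (cs.drop_suffix k).isInfix)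
    have hspec' := PySem.Chars.find_spec (s := cs) (sub := m') hnn'
    have h1 : (PySem.Chars.find cs m').toNat ≤ k := by
      by_contra hgt
      exact hspec'.2 k (by omega) hp'
    have hmem' : PySem.Chars.find cs m' ∈ p :: rest := by
      rw [← hps]
      simp only [List.mem_filter, List.mem_map, decide_eq_true_eq]
      exact ⟨⟨m', hm', rfl⟩, by omega⟩
    have h2 : v ≤ PySem.Chars.find cs m' := by
      rcases List.mem_cons.mp hmem' with h | h
      · rw [h]; exact (PySem.List.foldl_min_le rest p).1
      · exact (PySem.List.foldl_min_le rest p).2 _ h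
    have : v = (k : Int) := by omega
    simp only [hmin, this]

-- the end-index computations of the two ports agree, at String level
theorem pvMainEq (t : String) :
    (match PySem.List.min?
        ((["ADM and sub-ADM summaries appended to:",
           "\nINFO: ADM created",
           "\n[Q]",
           "\n[Q1]",
           "\n[Q100]",
           "\n[UI.py] [Q]",
           "\n[UI.py] [Q1]",
           "\n[UI.py] [Q100]"].map (fun marker_text => PySem.Str.find t marker_text)).filter
          (fun pos => pos ≠ -1)) (fun x => x) with
     | some m => m
     | none => (PySem.Str.len t : Int)) =
    ((pvFirstHit (["ADM and sub-ADM summaries appended to:",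
           "\nINFO: ADM created",
           "\n[Q]",
           "\n[Q1]",
           "\n[Q100]",
           "\n[UI.py] [Q]",
           "\n[UI.py] [Q1]",
           "\n[UI.py] [Q100]"].map String.toList) t.toList : Nat) : Int) := by
  simp only [List.map, PySem.Str.find_eq, PySem.Str.len_eq]
  exact pvKeyC ["ADM and sub-ADM summaries appended to:".toList,
    "\nINFO: ADM created".toList, "\n[Q]".toList, "\n[Q1]".toList, "\n[Q100]".toList,
    "\n[UI.py] [Q]".toList, "\n[UI.py] [Q1]".toList, "\n[UI.py] [Q100]".toList]
    (by decide) t.toList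

-- ===== VERDICT (by name: the statement is the Claim_ definition above) =====
theorem extract_latest_case_outcome_block_spec : Claim_equal_extract_latest_case_outcome_block := by
  intro raw_text _
  unfold Spec_extract_latest_case_outcome_block
  unfold extract_latest_case_outcome_block extract_latest_case_outcome_block_alt
  by_cases h1 : raw_text = ""
  · simp only [if_pos h1]
  · simp only [if_neg h1]
    by_cases h2 : PySem.Str.rfind raw_text "Case Outcome:" = -1
    · simp only [if_pos h2]
    · simp only [if_neg h2]
      rw [pvMainEq]
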